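-- pv_equiv track=rewrite | github.com/Twave1717/SKKAI-TourGenie | KY/aug_stage/stage1_survey_persona_aug/stage1_5/validators.py | validate_flight_layovers
-- ===== SOURCE A (Python) =====
-- from typing import Any, Dict, List, Optional, Tuple
--
-- def validate_flight_layovers(
--     preference: str,
--     flights_data: List[Dict[str, Any]]
-- ) -> Tuple[bool, str]:
--     """Q3-2: Layover tolerance via flight data analysis.
--
--     Args:
--         preference: "direct_only", "one_stop", "multiple_stops", "no_preference"
--         flights_data: List of flight dicts with origin, dest, stops
--
--     Returns:
--         (pass/fail, reason)
--     """
--     if preference.lower() in ["no_preference", "no preference"]: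
--         return True, "No preference"
--
--     if not flights_data:
--         return True, "No flight data"
--
--     # Count flights with layovers (if same origin-dest pair has multiple entries = layover)
--     route_counts = {}
--     for flight in flights_data:
--         route = (flight.get("OriginCityName", ""), flight.get("DestCityName", ""))
--         route_counts[route] = route_counts.get(route, 0) + 1
--
--     max_stops = max(route_counts.values()) - 1  # -1 because first flight = 0 stops
--
--     limits = {
--         "direct_only": 0,
--         "direct flights only": 0,
--         "one_stop": 1,
--         "direct preferred, 1 stop acceptable": 1,
--         "multiple_stops": 2,
--         "multiple stops acceptable (for savings)": 2,
--     }
--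
--     limit = limits.get(preference.lower(), 0)
--
--     if max_stops <= limit:
--         return True, f"Max stops: {max_stops} (within {limit})"
--     else:
--         return False, f"Max stops: {max_stops} (exceeds {limit})"
-- ===== SOURCE B (Python) =====
-- def _max_mult(rs):
--     # Iterative distinct-group elimination: peel off all copies of the first
--     # remaining route, record the group's size, repeat on what is left.
--     best = 0
--     while rs:
--         head = rs[0]
--         rest = [r for r in rs if r != head]
--         c = len(rs) - len(rest)
--         if best < c:
--             best = c
--         rs = rest
--     return best
--
--
-- def validate_flight_layovers(preference, flights_data):
--     p = preference.lower()
--     if p in ("no_preference", "no preference"):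
--         return True, "No preference"
--     if not flights_data:
--         return True, "No flight data"
--
--     routes = [(f.get("OriginCityName", ""), f.get("DestCityName", "")) for f in flights_data]
--     max_stops = _max_mult(routes) - 1
--
--     limits = {
--         "direct_only": 0,
--         "direct flights only": 0,
--         "one_stop": 1,
--         "direct preferred, 1 stop acceptable": 1,
--         "multiple_stops": 2,
--         "multiple stops acceptable (for savings)": 2,
--     }
--     limit = limits.get(p, 0)
--
--     if max_stops <= limit:
--         return True, f"Max stops: {max_stops} (within {limit})"
--     else:
--         return False, f"Max stops: {max_stops} (exceeds {limit})"
-- ===== Notes on version B (the rewrite author's own statement) =====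
-- stated objective: alternative
-- what changed: A's hash-accumulation pass (dict of per-route counts, then max over its values) is replaced by an iterative distinct-group elimination: repeatedly filter out every copy of the first remaining route, measuring each group's size as a length difference, keeping the running maximum group size; no dictionary or counter is built.
import Mathlib
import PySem

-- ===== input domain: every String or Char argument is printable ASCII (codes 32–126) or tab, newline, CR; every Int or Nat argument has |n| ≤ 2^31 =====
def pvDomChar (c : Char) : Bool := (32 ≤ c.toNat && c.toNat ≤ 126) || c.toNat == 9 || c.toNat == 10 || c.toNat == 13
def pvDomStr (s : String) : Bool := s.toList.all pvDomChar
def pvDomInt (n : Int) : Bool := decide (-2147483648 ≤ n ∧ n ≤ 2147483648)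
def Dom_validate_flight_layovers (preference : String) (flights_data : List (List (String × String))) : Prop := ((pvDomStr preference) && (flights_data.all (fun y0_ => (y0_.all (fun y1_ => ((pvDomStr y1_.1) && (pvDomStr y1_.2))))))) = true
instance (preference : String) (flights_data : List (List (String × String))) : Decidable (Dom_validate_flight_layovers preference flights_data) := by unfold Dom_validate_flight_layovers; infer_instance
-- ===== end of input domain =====

-- B replaces A's hash-accumulated route-count dict by iterative distinct-group elimination
-- (repeatedly filter out all copies of the first remaining route, keep the largest group size);
-- alternative decomposition, not claimed faster.

-- ===== PORT A =====
def pvRouteOf (f : List (String × String)) : String × String :=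
  ((PySem.Dict.mk f).getD "OriginCityName" "", (PySem.Dict.mk f).getD "DestCityName" "")

def pvLimits : PySem.Dict String Int :=
  PySem.Dict.mk [("direct_only", 0), ("direct flights only", 0), ("one_stop", 1),
    ("direct preferred, 1 stop acceptable", 1), ("multiple_stops", 2),
    ("multiple stops acceptable (for savings)", 2)]

def validate_flight_layovers (preference : String) (flights_data : List (List (String × String))) : Bool × String :=
  let p := PySem.Str.lower preference
  if p = "no_preference" ∨ p = "no preference" then (true, "No preference")
  else if flights_data = [] then (true, "No flight data")
  else
    let route_counts : PySem.Dict (String × String) Int :=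
      flights_data.foldl (fun d f =>
        let route := pvRouteOf f
        d.insert route (d.getD route 0 + 1)) PySem.Dict.empty
    -- max over a provably nonempty list: the 'none' arm of max? is dead code
    let max_stops := ((PySem.List.max? route_counts.values (fun x => x)).getD 0) - 1
    let limit := pvLimits.getD p 0
    if max_stops ≤ limit then
      (true, "Max stops: " ++ PySem.Int.toStr max_stops ++ " (within " ++ PySem.Int.toStr limit ++ ")")
    else
      (false, "Max stops: " ++ PySem.Int.toStr max_stops ++ " (exceeds " ++ PySem.Int.toStr limit ++ ")")

-- ===== PORT B =====
-- Source B's _max_mult while-loop: state (rs, best); each turn strips every copy of rs's head,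
-- takes the group size as a length difference, and keeps the running maximum.
def pvMaxMult : List (String × String) → Int → Int
  | [], best => best
  | r0 :: tl, best =>
    let rest := (r0 :: tl).filter (fun r => r ≠ r0)
    let c : Int := ((r0 :: tl).length : Int) - (rest.length : Int)
    pvMaxMult rest (if best < c then c else best)
termination_by rs _ => rs.length
decreasing_by
  have h : (List.filter (fun r => decide ¬r = r0) tl).length ≤ tl.length := List.length_filter_le _ _
  simp_all [List.filter]

def validate_flight_layovers_alt (preference : String) (flights_data : List (List (String × String))) : Bool × String :=
  let p := PySem.Str.lower preference
  if p = "no_preference" ∨ p = "no preference" then (true, "No preference")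
  else if flights_data = [] then (true, "No flight data")
  else
    let routes := flights_data.map pvRouteOf
    let max_stops := pvMaxMult routes 0 - 1
    let limit := pvLimits.getD p 0
    if max_stops ≤ limit then
      (true, "Max stops: " ++ PySem.Int.toStr max_stops ++ " (within " ++ PySem.Int.toStr limit ++ ")")
    else
      (false, "Max stops: " ++ PySem.Int.toStr max_stops ++ " (exceeds " ++ PySem.Int.toStr limit ++ ")")

-- ===== PRECONDITION & SPEC =====
def Spec_validate_flight_layovers (preference : String) (flights_data : List (List (String × String))) (out : Bool × String) : Prop := out = validate_flight_layovers_alt preference flights_data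
instance (preference : String) (flights_data : List (List (String × String))) (out : Bool × String) : Decidable (Spec_validate_flight_layovers preference flights_data out) := by unfold Spec_validate_flight_layovers; infer_instance

-- ===== CLAIM (what is proved, stated in full; the proofs are below) =====
def Claim_equal_validate_flight_layovers : Prop := ∀ (preference : String) (flights_data : List (List (String × String))), Dom_validate_flight_layovers preference flights_data → Spec_validate_flight_layovers preference flights_data (validate_flight_layovers preference flights_data)

-- ===== LEMMAS AND PROOFS =====

-- unfolding equations of the elimination loop
theorem pvMaxMult_nil (b : Int) : pvMaxMult [] b = b := by rw [pvMaxMult.eq_def]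

theorem pvMaxMult_cons (r0 : String × String) (tl : List (String × String)) (b : Int) :
    pvMaxMult (r0 :: tl) b =
      pvMaxMult ((r0 :: tl).filter (fun r => r ≠ r0))
        (if b < ((r0 :: tl).length : Int) - (((r0 :: tl).filter (fun r => r ≠ r0)).length : Int)
         then ((r0 :: tl).length : Int) - (((r0 :: tl).filter (fun r => r ≠ r0)).length : Int) else b) := by
  rw [pvMaxMult.eq_def]

-- the group size stripped each turn is the head's multiplicity in the whole remaining list
theorem pv_group_size (r0 : String × String) (tl : List (String × String)) :
    (((r0 :: tl).length : Int)) - (((r0 :: tl).filter (fun r => r ≠ r0)).length : Int)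
      = (List.count r0 (r0 :: tl) : Int) := by
  have h := List.length_eq_countP_add_countP (l := r0 :: tl) (p := fun r => r == r0)
  have h3 : List.countP (fun a => decide (¬(a == r0) = true)) (r0 :: tl)
      = List.countP (fun a => !(a == r0)) (r0 :: tl) :=
    List.countP_congr (fun a _ => by by_cases hab : a = r0 <;> simp [hab])
  have h2 : ((r0 :: tl).filter (fun r => r ≠ r0)).length
      = List.countP (fun a => !(a == r0)) (r0 :: tl) := by
    rw [List.countP_eq_length_filter]
    congr 1
    apply List.filter_congr
    intro a _
    by_cases hab : a = r0 <;> simp [hab]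
  rw [List.count] at *
  omega

-- characterisation of the elimination loop: its result is an upper bound of the seed and
-- of every multiplicity, and is either the seed or some element's multiplicity
theorem pvMaxMult_spec (n : Nat) (rs : List (String × String)) (hn : rs.length ≤ n) (b : Int) :
    b ≤ pvMaxMult rs b ∧
    (pvMaxMult rs b = b ∨ ∃ r ∈ rs, pvMaxMult rs b = (List.count r rs : Int)) ∧
    (∀ r ∈ rs, (List.count r rs : Int) ≤ pvMaxMult rs b) := by
  induction n generalizing rs b with
  | zero =>
    have : rs = [] := List.eq_nil_of_length_eq_zero (Nat.le_zero.mp hn)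
    subst this
    simp [pvMaxMult_nil]
  | succ n ih =>
    cases rs with
    | nil => simp [pvMaxMult_nil]
    | cons r0 tl =>
      simp only [List.length_cons] at hn
      rw [pvMaxMult_cons]
      set rest := (r0 :: tl).filter (fun r => r ≠ r0) with hrest
      set c : Int := ((r0 :: tl).length : Int) - (rest.length : Int) with hc
      have hcval : c = (List.count r0 (r0 :: tl) : Int) := pv_group_size r0 tl
      have hrestlen : rest.length ≤ n := by
        have : rest.length ≤ tl.length := by
          rw [hrest]
          simp only [List.filter]
          have : (List.filter (fun r => decide ¬r = r0) tl).length ≤ tl.length :=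
            List.length_filter_le _ _
          simp_all
        omega
      set b' := if b < c then c else b with hb'
      obtain ⟨ihle, ihmem, ihbd⟩ := ih rest hrestlen b'
      have hbb' : b ≤ b' := by rw [hb']; split <;> omega
      have hcb' : c ≤ b' := by rw [hb']; split <;> omega
      have hmemrest : ∀ r ∈ rest, r ∈ (r0 :: tl) ∧ r ≠ r0 := by
        intro r hr
        rw [hrest] at hr
        have := List.mem_filter.mp hr
        simpa using this
      have hcntrest : ∀ r, r ≠ r0 → List.count r rest = List.count r (r0 :: tl) := by
        intro r hne
        rw [hrest, List.count_filter]
        simp [hne]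
      refine ⟨le_trans hbb' ihle, ?_, ?_⟩
      · rcases ihmem with h | ⟨r, hr, hre⟩
        · rw [h, hb']
          split
          · exact Or.inr ⟨r0, List.mem_cons_self, by rw [hcval]⟩
          · exact Or.inl rfl
        · obtain ⟨hrin, hrne⟩ := hmemrest r hr
          exact Or.inr ⟨r, hrin, by rw [hre, hcntrest r hrne]⟩
      · intro r hr
        by_cases hre : r = r0
        · calc (List.count r (r0 :: tl) : Int) = c := by rw [hre]; exact hcval.symm
            _ ≤ b' := hcb'
            _ ≤ _ := ihle
        · have hrrest : r ∈ rest := by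
            rw [hrest, List.mem_filter]
            simp [hr, hre]
          rw [← hcntrest r hre]
          exact ihbd r hrrest

-- the loop computes the maximum multiplicity, i.e. B agrees with max over per-element counts
theorem pvMaxMult_eq_max (rs : List (String × String)) (h : rs ≠ []) :
    pvMaxMult rs 0
      = (PySem.List.max? (rs.map (fun r => (List.count r rs : Int))) (fun x => x)).getD 0 := by
  obtain ⟨hle0, hmem, hbd⟩ := pvMaxMult_spec rs.length rs le_rfl 0
  obtain ⟨r0, tl, rfl⟩ : ∃ r0 tl, rs = r0 :: tl := by
    cases rs with
    | nil => exact absurd rfl h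
    | cons a l => exact ⟨a, l, rfl⟩
  have hres : ∃ r ∈ (r0 :: tl), pvMaxMult (r0 :: tl) 0 = (List.count r (r0 :: tl) : Int) := by
    rcases hmem with h0 | h0
    · exfalso
      have h1 := hbd r0 List.mem_cons_self
      have : (1 : Int) ≤ (List.count r0 (r0 :: tl) : Int) := by
        have := List.count_pos_iff.mpr (List.mem_cons_self (a := r0) (l := tl))
        exact_mod_cast this
      omega
    · exact h0
  obtain ⟨r, hrin, hreq⟩ := hres
  obtain ⟨m, hm⟩ : ∃ m, PySem.List.max? ((r0 :: tl).map (fun r => (List.count r (r0 :: tl) : Int))) (fun x => x) = some m := by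
    cases hcx : PySem.List.max? ((r0 :: tl).map (fun r => (List.count r (r0 :: tl) : Int))) (fun x => x) with
    | none =>
      have := (PySem.List.max?_eq_none_iff _ _).mp hcx
      simp at this
    | some m => exact ⟨m, rfl⟩
  have hmmem := PySem.List.max?_mem hm
  obtain ⟨r', hr'in, hr'eq⟩ := List.mem_map.mp hmmem
  have hle1 : pvMaxMult (r0 :: tl) 0 ≤ m := by
    have : pvMaxMult (r0 :: tl) 0 ∈ (r0 :: tl).map (fun r => (List.count r (r0 :: tl) : Int)) :=
      List.mem_map.mpr ⟨r, hrin, hreq.symm⟩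
    exact PySem.List.max?_isMax hm _ this
  have hle2 : m ≤ pvMaxMult (r0 :: tl) 0 := by
    rw [← hr'eq]
    exact hbd r' hr'in
  rw [hm]
  simp
  omega

-- A's max over the counter's values equals the max over per-element counts.
theorem pv_max_values_eq (routes : List (String × String)) (h : routes ≠ []) :
    (PySem.List.max? (PySem.Dict.counter routes).values (fun x : Int => x)).getD 0
      = (PySem.List.max? (routes.map (fun r => (List.count r routes : Int))) (fun x : Int => x)).getD 0 := by
  have hvals' : (PySem.Dict.counter routes).values
      = (PySem.Set.ofList routes).map (fun k => (List.count k routes : Int)) := by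
    rw [PySem.Dict.values_eq_map_keys _ (PySem.Dict.nodup_keys_counter routes) 0,
        PySem.Dict.keys_counter]
    exact List.map_congr_left (fun k _ => PySem.Dict.getD_counter routes k)
  obtain ⟨r0, rs, rfl⟩ : ∃ r0 rs, routes = r0 :: rs := by
    cases routes with
    | nil => exact absurd rfl h
    | cons a l => exact ⟨a, l, rfl⟩
  set routes := r0 :: rs
  have h1ne : (PySem.Dict.counter routes).values ≠ [] := by
    rw [hvals']
    intro hc
    have : r0 ∈ PySem.Set.ofList routes := (PySem.Set.mem_ofList routes r0).mpr (List.mem_cons_self)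
    simp [List.map_eq_nil_iff] at hc
    rw [hc] at this
    exact absurd this (List.not_mem_nil)
  have h2ne : (routes.map (fun r => (List.count r routes : Int))) ≠ [] := by simp [routes]
  obtain ⟨m1, hm1⟩ : ∃ m1, PySem.List.max? (PySem.Dict.counter routes).values (fun x : Int => x) = some m1 := by
    cases hc : PySem.List.max? (PySem.Dict.counter routes).values (fun x : Int => x) with
    | none => exact absurd ((PySem.List.max?_eq_none_iff _ _).mp hc) h1ne
    | some m => exact ⟨m, rfl⟩
  obtain ⟨m2, hm2⟩ : ∃ m2, PySem.List.max? (routes.map (fun r => (List.count r routes : Int))) (fun x : Int => x) = some m2 := by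
    cases hc : PySem.List.max? (routes.map (fun r => (List.count r routes : Int))) (fun x : Int => x) with
    | none => exact absurd ((PySem.List.max?_eq_none_iff _ _).mp hc) h2ne
    | some m => exact ⟨m, rfl⟩
  have hm1mem := PySem.List.max?_mem hm1
  have hm2mem := PySem.List.max?_mem hm2
  have hle12 : m1 ≤ m2 := by
    rw [hvals'] at hm1mem
    obtain ⟨k, hk, hkeq⟩ := List.mem_map.mp hm1mem
    have : m1 ∈ routes.map (fun r => (List.count r routes : Int)) :=
      List.mem_map.mpr ⟨k, (PySem.Set.mem_ofList routes k).mp hk, hkeq⟩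
    exact PySem.List.max?_isMax hm2 m1 this
  have hle21 : m2 ≤ m1 := by
    obtain ⟨r', hr', hreq⟩ := List.mem_map.mp hm2mem
    have : m2 ∈ (PySem.Dict.counter routes).values := by
      rw [hvals']
      exact List.mem_map.mpr ⟨r', (PySem.Set.mem_ofList routes r').mpr hr', hreq⟩
    exact PySem.List.max?_isMax hm1 m2 this
  rw [hm1, hm2]
  simp
  omega

-- ===== VERDICT (by name: the statement is the Claim_ definition above) =====
theorem validate_flight_layovers_spec : Claim_equal_validate_flight_layovers := by
  intro preference flights_data _
  unfold Spec_validate_flight_layovers validate_flight_layovers validate_flight_layovers_alt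
  simp only []
  set p := PySem.Str.lower preference with hp
  by_cases hpref : p = "no_preference" ∨ p = "no preference"
  · simp [hpref]
  · simp only [hpref, if_false]
    by_cases hfe : flights_data = []
    · simp [hfe]
    · simp only [hfe, if_false]
      have hfold : flights_data.foldl (fun d f =>
            let route := pvRouteOf f
            d.insert route (d.getD route 0 + 1)) PySem.Dict.empty
          = PySem.Dict.counter (flights_data.map pvRouteOf) := by
        rw [← PySem.Dict.foldl_insert_getD_add_one_eq_counter, List.foldl_map]
      rw [hfold]
      have hrne : flights_data.map pvRouteOf ≠ [] := by simp [hfe]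
      rw [pv_max_values_eq (flights_data.map pvRouteOf) hrne,
          ← pvMaxMult_eq_max (flights_data.map pvRouteOf) hrne]
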